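-- pv_equiv track=rewrite | github.com/sergioma295/NanoSenAQM | PCA/pca.py | getGases
-- ===== SOURCE A (Python) =====
-- def getGases(gasName):
--     gasName_ = []   # Variable temporal para almacenar los tipos de gases
--     id = 1          # Variable ID para identificar el tipo de gas
--     gasID = []      # Variable para almacenar el identificador del gas.
--     for i in range(len(gasName)):   # Recorremos la lista donde están almacenados todos los gases de todas las medidas (por ahora solo medidas con un gas (NO INTERFERENCIAS)).
--         if gasName[i] in gasName_:  # Si el nombre del gas está en la lista temporal
--             for j in range(len(gasName)):  # Recorremos la lista que almacena los nombres de los sensores.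
--                 if gasName[i] == gasName[j]:  # Buscamos el índice del sensor que ya ha sido almacenado.
--                     gasName_.append(gasName[i])  # Consultamos su nombre y lo añadimos a la lista temporal
--                     gasID.append(gasID[j])  # Añadimos el ID que corresponde a ese índice. De esta forma tenemos el mismo ID que el almacenado anteriormente
--                     break
--         else:
--             gasName_.append(gasName[i])         # Añadimos el nombre del gas a la lista temporal
--             gasID.append(id)                    # Añadimos el ID a la lista gasID
--             id += 1                             # Incrementamos el valor del ID.
--     return gasName_, gasID
-- ===== SOURCE B (Python) =====
-- def getGases(gasName):
--     # The id of a name is a closed form: the number of distinct names in the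
--     # prefix of gasName that ends at the name's first occurrence.
--     return list(gasName), [len(set(gasName[:gasName.index(name) + 1]))
--                            for name in gasName]
-- ===== Notes on version B (the rewrite author's own statement) =====
-- stated objective: alternative
-- what changed: Replaces A's stateful pass (running id counter, growing temp list, inner first-match rescan with break) by a stateless per-element closed form: each id is the count of distinct names in the prefix ending at that name's first occurrence.
import Mathlib
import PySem

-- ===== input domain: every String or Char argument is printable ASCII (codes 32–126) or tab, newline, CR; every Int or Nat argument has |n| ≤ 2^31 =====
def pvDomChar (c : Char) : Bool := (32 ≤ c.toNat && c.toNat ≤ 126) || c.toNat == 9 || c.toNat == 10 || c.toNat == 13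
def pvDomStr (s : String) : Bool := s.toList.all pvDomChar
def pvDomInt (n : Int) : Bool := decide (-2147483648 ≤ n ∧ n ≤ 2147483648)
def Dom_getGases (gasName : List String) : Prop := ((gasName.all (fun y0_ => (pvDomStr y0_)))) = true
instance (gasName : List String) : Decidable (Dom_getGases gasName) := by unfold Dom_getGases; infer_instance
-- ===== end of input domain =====

-- B replaces A's stateful pass (id counter + rescans) by a stateless per-element closed form: id = count of distinct names in the prefix ending at the name's first occurrence (alternative decomposition, same cost).


-- ===== PORT A =====
-- inner 'for j in range(len(gasName))' loop with its break: returns gasID[j] for the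
-- first j with gasName[i] == gasName[j]; none = the loop finished without a break.
-- (pyGet? = gasID[j]; its none case — Python's IndexError — is unreachable here.)
def getGasesInner (gasName : List String) (gasID : List Int) (g : String) (j : Nat) : Option Int :=
  if h : j < gasName.length then
    if gasName[j] = g then PySem.List.pyGet? gasID (j : Int)
    else getGasesInner gasName gasID g (j + 1)
  else none
termination_by gasName.length - j

-- outer 'for i in range(len(gasName))' loop over the state (gasName_, id, gasID)
def getGasesLoop (gasName : List String) (i : Nat) (gasName_ : List String) (id : Int) (gasID : List Int) : List String × List Int :=
  if h : i < gasName.length then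
    if gasName[i] ∈ gasName_ then
      match getGasesInner gasName gasID gasName[i] 0 with
      | some v => getGasesLoop gasName (i + 1) (gasName_ ++ [gasName[i]]) id (gasID ++ [v])
      | none => getGasesLoop gasName (i + 1) gasName_ id gasID
    else
      getGasesLoop gasName (i + 1) (gasName_ ++ [gasName[i]]) (id + 1) (gasID ++ [id])
  else (gasName_, gasID)
termination_by gasName.length - i

def getGases (gasName : List String) : List String × List Int :=
  getGasesLoop gasName 0 [] 1 []

-- ===== PORT B =====
-- stateless comprehension: len(set(gasName[:gasName.index(name)+1])) for each name.
-- index? is none only when name ∉ gasName — unreachable since name is drawn from gasName.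
def getGases_alt (gasName : List String) : List String × List Int :=
  (gasName, gasName.map (fun name =>
    match PySem.List.index? gasName name with
    | some f => ((PySem.Set.len (PySem.Set.ofList (PySem.List.slice gasName none (some ((f : Int) + 1))))) : Int)
    | none => 0))

-- ===== PRECONDITION & SPEC =====
def Spec_getGases (gasName : List String) (out : List String × List Int) : Prop := out = getGases_alt gasName
instance (gasName : List String) (out : List String × List Int) : Decidable (Spec_getGases gasName out) := by unfold Spec_getGases; infer_instance

-- ===== CLAIM (what is proved, stated in full; the proofs are below) =====
def Claim_equal_getGases : Prop := ∀ (gasName : List String), Dom_getGases gasName → Spec_getGases gasName (getGases gasName)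

-- ===== LEMMAS AND PROOFS =====

-- ordered dedup (first occurrences) of l appended to acc
def pvDed (acc : List String) : List String → List String
  | [] => acc
  | g :: t => pvDed (if g ∈ acc then acc else acc ++ [g]) t

-- the id both programs assign to name g (as characterised below)
def pvFn (gas : List String) (g : String) : Int :=
  (List.idxOf g (pvDed [] gas) : Int) + 1

theorem aux_idxOf_concat (l : List String) (g : String) (h : g ∉ l) :
    List.idxOf g (l ++ [g]) = l.length := by
  induction l with
  | nil => simp
  | cons a t ih => simp at h; simp [Ne.symm h.1, ih h.2]

theorem aux_ne_of_lt_idxOf (l : List String) (k : Nat) (g : String)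
    (h1 : k < List.idxOf g l) (h2 : k < l.length) : l[k] ≠ g := by
  induction l generalizing k with
  | nil => simp at h2
  | cons a t ih =>
    rw [List.idxOf_cons] at h1
    cases k with
    | zero => intro he; simp at he; subst he; simp at h1
    | succ m =>
      cases hb : (a == g) with
      | false => simp [hb] at h1; simpa using ih m (by omega) (by simpa using h2)
      | true => simp [hb] at h1

theorem aux_idxOf_le (l : List String) (j : Nat) (g : String)
    (h2 : j < l.length) (h : l[j] = g) : List.idxOf g l ≤ j := by
  induction l generalizing j with
  | nil => simp at h2
  | cons a t ih =>
    rw [List.idxOf_cons]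
    cases j with
    | zero => simp at h; simp [h]
    | succ m =>
      have := ih m (by simpa using h2) (by simpa using h)
      cases hb : (a == g) with
      | false => rw [cond_false]; omega
      | true => simp

theorem pvDed_append (acc : List String) (l1 l2 : List String) :
    pvDed acc (l1 ++ l2) = pvDed (pvDed acc l1) l2 := by
  induction l1 generalizing acc with
  | nil => rfl
  | cons g t ih => simp [pvDed, ih]

theorem pvDed_prefix (acc : List String) (l : List String) :
    ∃ t, pvDed acc l = acc ++ t := by
  induction l generalizing acc with
  | nil => exact ⟨[], by simp [pvDed]⟩
  | cons g t ih =>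
    by_cases hg : g ∈ acc
    · obtain ⟨t', ht⟩ := ih acc
      exact ⟨t', by simp [pvDed, hg, ht]⟩
    · obtain ⟨t', ht⟩ := ih (acc ++ [g])
      exact ⟨g :: t', by simp [pvDed, hg, ht]⟩

theorem pvDed_mem (acc : List String) (l : List String) (x : String) :
    x ∈ pvDed acc l ↔ x ∈ acc ∨ x ∈ l := by
  induction l generalizing acc with
  | nil => simp [pvDed]
  | cons g t ih =>
    by_cases hg : g ∈ acc
    · rw [show pvDed acc (g :: t) = pvDed (if g ∈ acc then acc else acc ++ [g]) t from rfl,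
        if_pos hg, ih]
      simp only [List.mem_cons]
      constructor
      · rintro (h | h)
        exacts [Or.inl h, Or.inr (Or.inr h)]
      · rintro (h | rfl | h)
        exacts [Or.inl h, Or.inl hg, Or.inr h]
    · rw [show pvDed acc (g :: t) = pvDed (if g ∈ acc then acc else acc ++ [g]) t from rfl,
        if_neg hg, ih]
      simp [or_assoc]

-- pvDed is exactly Python's set construction (foldl of Set.add)
theorem pvDed_eq_foldl_add (l acc : List String) :
    pvDed acc l = l.foldl PySem.Set.add acc := by
  induction l generalizing acc with
  | nil => rfl
  | cons g t ih =>
    rw [List.foldl_cons, ← ih]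
    show pvDed (if g ∈ acc then acc else acc ++ [g]) t = pvDed (PySem.Set.add acc g) t
    congr 1
    simp [PySem.Set.add, PySem.Set.contains]

-- the id of a fresh name: gas[i] does not occur before position i
theorem pvFn_fresh (gas : List String) (i : Nat) (h : i < gas.length)
    (hg : gas[i] ∉ gas.take i) :
    pvFn gas gas[i] = ((pvDed [] (gas.take i)).length : Int) + 1 := by
  have hsplit : gas = gas.take i ++ (gas[i] :: gas.drop (i + 1)) := by
    conv_lhs => rw [← List.take_append_drop i gas]
    rw [List.drop_eq_getElem_cons h]
  have hded : gas[i] ∉ pvDed [] (gas.take i) := by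
    rw [pvDed_mem]; simpa using hg
  have : pvDed [] gas = pvDed (pvDed [] (gas.take i) ++ [gas[i]]) (gas.drop (i + 1)) := by
    conv_lhs => rw [hsplit]
    rw [show gas.take i ++ (gas[i] :: gas.drop (i + 1))
          = (gas.take i ++ [gas[i]]) ++ gas.drop (i + 1) by simp]
    rw [pvDed_append, pvDed_append]
    simp [pvDed, hded]
  obtain ⟨t, ht⟩ := pvDed_prefix (pvDed [] (gas.take i) ++ [gas[i]]) (gas.drop (i + 1))
  rw [pvFn, this, ht, List.idxOf_append_of_mem (by simp), aux_idxOf_concat _ _ hded]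

-- the inner scan finds the first occurrence and returns its already-assigned id
theorem innerA_steps (gas : List String) (gasID : List Int) (g : String)
    (hmem : g ∈ gas) :
    ∀ (n j : Nat), List.idxOf g gas - j = n → j ≤ List.idxOf g gas →
      getGasesInner gas gasID g j = PySem.List.pyGet? gasID ((List.idxOf g gas : Nat) : Int) := by
  intro n
  induction n with
  | zero =>
    intro j hn hj
    have hj0 : j = List.idxOf g gas := by omega
    subst hj0
    rw [getGasesInner, dif_pos (List.idxOf_lt_length_of_mem hmem),
      if_pos (List.getElem_idxOf (List.idxOf_lt_length_of_mem hmem))]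
  | succ n ih =>
    intro j hn hj
    have hjlt : j < List.idxOf g gas := by omega
    have hlen : j < gas.length := lt_trans hjlt (List.idxOf_lt_length_of_mem hmem)
    rw [getGasesInner, dif_pos hlen, if_neg (aux_ne_of_lt_idxOf gas j g hjlt hlen)]
    exact ih (j + 1) (by omega) (by omega)

theorem innerA (gas : List String) (i : Nat) (h : i < gas.length)
    (hm : gas[i] ∈ gas.take i) :
    getGasesInner gas ((gas.take i).map (pvFn gas)) gas[i] 0
      = some (pvFn gas gas[i]) := by
  have hmem : gas[i] ∈ gas := List.mem_of_mem_take hm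
  obtain ⟨k, hk, hkv⟩ := List.getElem_of_mem hm
  have hki : k < i ∧ k < gas.length := by simpa [List.length_take, Nat.lt_min] using hk
  obtain ⟨hki, hklen⟩ := hki
  have hkg : gas[k]'(by omega) = gas[i] := by
    rw [← hkv]; simp [List.getElem_take]
  have hj0 : List.idxOf gas[i] gas < i :=
    lt_of_le_of_lt (aux_idxOf_le gas k gas[i] (by omega) hkg) hki
  rw [innerA_steps gas _ gas[i] hmem (List.idxOf gas[i] gas) 0 (by omega) (by omega)]
  have hlt : List.idxOf gas[i] gas < ((gas.take i).map (pvFn gas)).length := by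
    simp [List.length_take]; omega
  rw [PySem.List.pyGet?_natCast, List.getElem?_eq_getElem hlt]
  congr 1
  rw [List.getElem_map]
  congr 1
  rw [List.getElem_take]
  exact List.getElem_idxOf (List.idxOf_lt_length_of_mem hmem)

theorem loopA_inv (gas : List String) :
    ∀ (n i : Nat), gas.length - i = n → i ≤ gas.length →
    getGasesLoop gas i (gas.take i) (((pvDed [] (gas.take i)).length : Int) + 1)
      ((gas.take i).map (pvFn gas))
    = (gas, gas.map (pvFn gas)) := by
  intro n
  induction n with
  | zero =>
    intro i hn hi
    have : i = gas.length := by omega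
    subst this
    rw [getGasesLoop, dif_neg (by omega)]
    simp
  | succ n ih =>
    intro i hn hi
    have h : i < gas.length := by omega
    have htake : gas.take (i + 1) = gas.take i ++ [gas[i]] := by
      rw [List.take_add_one, List.getElem?_eq_getElem h]; rfl
    rw [getGasesLoop, dif_pos h]
    by_cases hm : gas[i] ∈ gas.take i
    · rw [if_pos hm, innerA gas i h hm]
      have hded : pvDed [] (gas.take (i + 1)) = pvDed [] (gas.take i) := by
        rw [htake, pvDed_append]
        simp [pvDed, (pvDed_mem [] (gas.take i) gas[i]).mpr (Or.inr hm)]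
      have := ih (i + 1) (by omega) (by omega)
      rw [hded, htake, List.map_append, List.map_cons, List.map_nil] at this
      exact this
    · rw [if_neg hm]
      have hdm : gas[i] ∉ pvDed [] (gas.take i) := by
        rw [pvDed_mem]; simpa using hm
      have hded : pvDed [] (gas.take (i + 1)) = pvDed [] (gas.take i) ++ [gas[i]] := by
        rw [htake, pvDed_append]; simp [pvDed, hdm]
      have hfn := pvFn_fresh gas i h hm
      have := ih (i + 1) (by omega) (by omega)
      rw [hded, htake, List.map_append, List.map_cons, List.map_nil, hfn] at this
      have e1 : (((pvDed [] (gas.take i) ++ [gas[i]]).length : Nat) : Int) + 1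
          = ((pvDed [] (gas.take i)).length : Int) + 1 + 1 := by
        simp only [List.length_append, List.length_cons, List.length_nil]
        push_cast; ring
      rw [e1] at this
      exact this

theorem aux_idxOf?_of_mem (l : List String) (x : String) (h : x ∈ l) :
    List.idxOf? x l = some (List.idxOf x l) := by
  induction l with
  | nil => simp at h
  | cons a t ih =>
    rw [List.idxOf?_cons, List.idxOf_cons]
    by_cases hax : a = x
    · simp [hax]
    · have hb : (a == x) = false := by simp [hax]
      simp only [hb, cond_false]
      rw [ih (by simpa [Ne.symm hax] using h)]
      rfl

-- B's per-element closed form computes pvFn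
theorem altB (gas : List String) :
    getGases_alt gas = (gas, gas.map (pvFn gas)) := by
  rw [getGases_alt]
  refine Prod.ext rfl ?_
  apply List.map_congr_left
  intro name hname
  -- the .index lookup succeeds with the first-occurrence index
  have hidx : PySem.List.index? gas name = some (List.idxOf name gas) := by
    rw [PySem.List.index?_eq_idxOf?]
    exact aux_idxOf?_of_mem gas name hname
  rw [hidx]
  set f := List.idxOf name gas with hf
  have hflt : f < gas.length := List.idxOf_lt_length_of_mem hname
  have hget : gas[f] = name := List.getElem_idxOf hflt
  have hfr : gas[f] ∉ gas.take f := by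
    intro hmem
    obtain ⟨k, hk, hkv⟩ := List.getElem_of_mem hmem
    have hki : k < f ∧ k < gas.length := by simpa [List.length_take, Nat.lt_min] using hk
    have hkg : gas[k]'(hki.2) = name := by
      rw [← hget, ← hkv]; simp [List.getElem_take]
    exact aux_ne_of_lt_idxOf gas k name hki.1 hki.2 hkg
  -- the slice is the prefix through the first occurrence
  have hslice : PySem.List.slice gas none (some ((f : Int) + 1)) = gas.take (f + 1) := by
    have : ((f : Int) + 1) = ((f + 1 : Nat) : Int) := by push_cast; ring
    rw [this, PySem.List.slice_to_natCast]
  have htake : gas.take (f + 1) = gas.take f ++ [name] := by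
    rw [List.take_add_one, List.getElem?_eq_getElem hflt, hget]; rfl
  have hdm : name ∉ pvDed [] (gas.take f) := by
    rw [pvDed_mem]; simpa using (hget ▸ hfr)
  have hded : pvDed [] (gas.take (f + 1)) = pvDed [] (gas.take f) ++ [name] := by
    rw [htake, pvDed_append]; simp [pvDed, hdm]
  have hofl : PySem.Set.ofList (gas.take (f + 1)) = pvDed [] (gas.take f) ++ [name] := by
    rw [PySem.Set.ofList_eq_foldl, ← pvDed_eq_foldl_add, hded]
  show ((PySem.Set.len (PySem.Set.ofList (PySem.List.slice gas none (some ((f : Int) + 1))))) : Int) = pvFn gas name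
  rw [hslice, hofl]
  have hfn := pvFn_fresh gas f hflt hfr
  rw [hget] at hfn
  rw [hfn]
  simp [PySem.Set.len]

-- ===== VERDICT (by name: the statement is the Claim_ definition above) =====
theorem getGases_spec : Claim_equal_getGases := by
  intro gas _
  show getGases gas = getGases_alt gas
  have hA := loopA_inv gas gas.length 0 (by omega) (by omega)
  simp [pvDed] at hA
  rw [getGases, hA, altB]
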